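-- pv_equiv track=rewrite | github.com/timopol8/samplecode | Minesweeper/mine_3.py | count_ninjas
-- ===== SOURCE A (Python) =====
-- def count_ninjas(x,y,roomi):
--     """
--     Counts the ninjas surrounding one tile in the given room and
--     returns the result. The function assumes the selected tile does
--     not have a ninja in it - if it does, it counts that one as well.
--     """
--     num = 0             #j - x coor; i = y coor. Starts from top left
--     for i, rows in enumerate(roomi):
--         if i in range(y-1, y+2):
--             for j, cell in enumerate(rows):
--                 if j in range(x-1, x+2):
--                     if cell == 'N':
--                         num += 1
--     return int(num)
-- ===== SOURCE B (Python) =====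
-- def count_ninjas(x, y, roomi):
--     """O(1)-per-call: slice out the up-to-3x3 neighborhood directly instead of
--     scanning the whole room."""
--     rows = roomi[max(0, y - 1):max(0, y + 2)]
--     return sum(row[max(0, x - 1):max(0, x + 2)].count('N') for row in rows)
-- ===== Notes on version B (the rewrite author's own statement) =====
-- stated objective: faster
-- what changed: Instead of enumerating every row and every cell of the room and testing each index for membership in range(y-1,y+2)/range(x-1,x+2), B slices the up-to-3x3 neighborhood out of the room directly (with the starts clamped at 0 so Python slicing never wraps) and counts 'N' in those at most 9 cells.
import Mathlib
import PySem

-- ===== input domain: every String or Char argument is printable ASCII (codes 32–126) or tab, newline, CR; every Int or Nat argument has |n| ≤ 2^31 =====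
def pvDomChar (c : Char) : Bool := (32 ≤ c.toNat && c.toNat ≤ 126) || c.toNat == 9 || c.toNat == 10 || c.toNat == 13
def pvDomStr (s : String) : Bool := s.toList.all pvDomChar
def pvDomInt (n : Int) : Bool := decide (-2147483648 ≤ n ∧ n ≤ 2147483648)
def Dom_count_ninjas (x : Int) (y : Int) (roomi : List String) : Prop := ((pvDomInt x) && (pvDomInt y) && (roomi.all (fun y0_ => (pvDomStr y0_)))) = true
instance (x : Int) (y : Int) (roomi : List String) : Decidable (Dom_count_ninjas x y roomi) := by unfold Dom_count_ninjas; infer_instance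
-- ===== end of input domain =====

-- B slices the up-to-3x3 neighborhood out directly instead of scanning every row and cell (objective: faster, asymptotic).

-- ===== PORT A =====
def count_ninjas (x : Int) (y : Int) (roomi : List String) : Int :=
  (PySem.List.enumerate roomi 0).foldl
    (fun num p =>
      if p.1 ∈ PySem.List.pyRange (y - 1) (y + 2) 1 then
        (PySem.List.enumerate p.2.toList 0).foldl
          (fun n q =>
            if q.1 ∈ PySem.List.pyRange (x - 1) (x + 2) 1 then
              if q.2 = 'N' then n + 1 else n
            else n) num
      else num) 0

-- ===== PORT B =====
def count_ninjas_alt (x : Int) (y : Int) (roomi : List String) : Int :=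
  ((PySem.List.slice roomi (some (max 0 (y - 1))) (some (max 0 (y + 2)))).map
    (fun row =>
      ((PySem.List.slice row.toList (some (max 0 (x - 1))) (some (max 0 (x + 2)))).count 'N' : Int))).sum

-- ===== PRECONDITION & SPEC =====
def Spec_count_ninjas (x : Int) (y : Int) (roomi : List String) (out : Int) : Prop := out = count_ninjas_alt x y roomi
instance (x : Int) (y : Int) (roomi : List String) (out : Int) : Decidable (Spec_count_ninjas x y roomi out) := by unfold Spec_count_ninjas; infer_instance

-- ===== CLAIM (what is proved, stated in full; the proofs are below) =====
def Claim_equal_count_ninjas : Prop := ∀ (x : Int) (y : Int) (roomi : List String), Dom_count_ninjas x y roomi → Spec_count_ninjas x y roomi (count_ninjas x y roomi)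

-- ===== LEMMAS AND PROOFS =====

-- A fold over 'enumerate' that adds f(elem) exactly when the index lies in [a, b)
-- equals init plus the sum of f over the corresponding drop/take window.
theorem fold_enum_window {α : Type} (l : List α) (a b : Int) (f : α → Int) :
    ∀ (s init : Int),
    (PySem.List.enumerate l s).foldl (fun n p => if a ≤ p.1 ∧ p.1 < b then n + f p.2 else n) init
      = init + (((l.drop (a - s).toNat).take ((b - s).toNat - (a - s).toNat)).map f).sum := by
  induction l with
  | nil => intro s init; simp [PySem.List.enumerate_nil]
  | cons hd tl ih =>
    intro s init
    rw [PySem.List.enumerate_cons, List.foldl_cons, ih (s + 1)]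
    by_cases ha : a ≤ s
    · have h1 : (a - s).toNat = 0 := by omega
      have h2 : (a - (s + 1)).toNat = 0 := by omega
      by_cases hb : s < b
      · have h3 : (b - s).toNat = (b - (s + 1)).toNat + 1 := by omega
        simp [ha, hb, h1, h2, h3]
        ring
      · have h3 : (b - s).toNat = 0 := by omega
        have h4 : (b - (s + 1)).toNat = 0 := by omega
        simp [ha, hb, h1, h2, h3, h4]
    · have h1 : (a - s).toNat = (a - (s + 1)).toNat + 1 := by omega
      have h2 : (b - s).toNat - ((a - (s + 1)).toNat + 1) = (b - (s + 1)).toNat - (a - (s + 1)).toNat := by omega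
      simp [ha, h1, h2]

theorem sum_map_indicator_eq_count (l : List Char) :
    ((l.map (fun c => if c = 'N' then (1 : Int) else 0)).sum) = (l.count 'N' : Int) := by
  induction l with
  | nil => simp
  | cons hd tl ih =>
    by_cases h : hd = 'N' <;> simp [h, ih]; ring

-- the per-row count, both as A computes it and as B computes it
theorem row_count_eq (x : Int) (row : String) (num : Int) :
    (PySem.List.enumerate row.toList 0).foldl
      (fun n q =>
        if q.1 ∈ PySem.List.pyRange (x - 1) (x + 2) 1 then
          if q.2 = 'N' then n + 1 else n
        else n) num
    = num + ((PySem.List.slice row.toList (some (max 0 (x - 1))) (some (max 0 (x + 2)))).count 'N' : Int) := by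
  have hfn : (fun (n : Int) (q : Int × Char) =>
        if q.1 ∈ PySem.List.pyRange (x - 1) (x + 2) 1 then
          if q.2 = 'N' then n + 1 else n
        else n)
      = (fun n q => if x - 1 ≤ q.1 ∧ q.1 < x + 2 then n + (if q.2 = 'N' then (1 : Int) else 0) else n) := by
    funext n q
    simp only [PySem.List.mem_pyRange_one]
    split_ifs <;> simp
  rw [hfn, fold_enum_window row.toList (x - 1) (x + 2) (fun c => if c = 'N' then (1 : Int) else 0) 0 num]
  have h1 : (x - 1 - 0).toNat = (max 0 (x - 1)).toNat := by omega
  have h2 : (x + 2 - 0).toNat = (max 0 (x + 2)).toNat := by omega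
  rw [h1, h2, ← PySem.List.slice_toNat row.toList (by omega) (by omega),
      sum_map_indicator_eq_count]

-- ===== VERDICT (by name: the statement is the Claim_ definition above) =====
theorem count_ninjas_spec : Claim_equal_count_ninjas := by
  intro x y roomi _
  unfold Spec_count_ninjas count_ninjas count_ninjas_alt
  have hfn : (fun (num : Int) (p : Int × String) =>
        if p.1 ∈ PySem.List.pyRange (y - 1) (y + 2) 1 then
          (PySem.List.enumerate p.2.toList 0).foldl
            (fun n q =>
              if q.1 ∈ PySem.List.pyRange (x - 1) (x + 2) 1 then
                if q.2 = 'N' then n + 1 else n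
              else n) num
        else num)
      = (fun num p => if y - 1 ≤ p.1 ∧ p.1 < y + 2 then
          num + ((PySem.List.slice p.2.toList (some (max 0 (x - 1))) (some (max 0 (x + 2)))).count 'N' : Int)
        else num) := by
    funext num p
    rw [row_count_eq]
    simp only [PySem.List.mem_pyRange_one]
  rw [hfn, fold_enum_window roomi (y - 1) (y + 2)
        (fun row => ((PySem.List.slice row.toList (some (max 0 (x - 1))) (some (max 0 (x + 2)))).count 'N' : Int)) 0 0]
  have h1 : (y - 1 - 0).toNat = (max 0 (y - 1)).toNat := by omega
  have h2 : (y + 2 - 0).toNat = (max 0 (y + 2)).toNat := by omega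
  rw [h1, h2, ← PySem.List.slice_toNat roomi (by omega) (by omega)]
  simp
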